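-- pv_equiv track=rewrite | github.com/flopshoubox/VRML-ProceduralGeneration | TreeClass/CostumPrint.py | listStr4
-- ===== SOURCE A (Python) =====
-- def listStr4(list, tab):
--     ind = 0
--     stri = "\t" * tab + " "
--     for x in list:
--         ind += 1
--         if ind%4 == 0:
--             stri += str(x) + ",\n" + "\t" * tab + " "
--         else:
--             stri += str(x) + " "
--     return stri
-- ===== SOURCE B (Python) =====
-- def listStr4(list, tab):
--     prefix = "\t" * tab + " "
--     sep = ",\n" + prefix
--     parts = []
--     for i in range(0, len(list), 4):
--         chunk = list[i:i + 4]
--         s = " ".join(map(str, chunk))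
--         s += sep if len(chunk) == 4 else " "
--         parts.append(s)
--     return prefix + "".join(parts)
-- ===== Notes on version B (the rewrite author's own statement) =====
-- stated objective: alternative
-- what changed: Replaces the flat element loop with a modulo-4 counter and repeated string += by chunking the list into groups of 4, joining each chunk with ' ', and concatenating chunk strings onto the prefix.
import Mathlib
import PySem

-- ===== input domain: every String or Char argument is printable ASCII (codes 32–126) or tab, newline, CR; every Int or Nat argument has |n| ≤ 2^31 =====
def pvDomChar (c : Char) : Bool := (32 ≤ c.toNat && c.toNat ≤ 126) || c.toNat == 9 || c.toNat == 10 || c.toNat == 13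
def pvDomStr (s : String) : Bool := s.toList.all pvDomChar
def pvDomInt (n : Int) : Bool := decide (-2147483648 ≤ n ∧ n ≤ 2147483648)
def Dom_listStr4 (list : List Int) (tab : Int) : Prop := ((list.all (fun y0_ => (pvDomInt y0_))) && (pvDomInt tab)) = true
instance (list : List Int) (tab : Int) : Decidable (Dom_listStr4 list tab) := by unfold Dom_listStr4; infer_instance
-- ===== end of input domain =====

-- B re-implements A by chunking the list into groups of 4 and joining each chunk,
-- instead of A's flat loop with a modulo counter (objective: alternative decomposition).

-- ===== PORT A =====
-- step of A's for-loop: state = (ind, stri), both updated as in the Python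
def listStr4Step (tab : Int) (s : Int × List Char) (x : Int) : Int × List Char :=
  let ind := s.1 + 1
  if PySem.Int.mod ind 4 == 0 then
    (ind, s.2 ++ PySem.Int.toChars x ++ [',', '\n'] ++ PySem.List.pyRepeat ['\t'] tab ++ [' '])
  else
    (ind, s.2 ++ PySem.Int.toChars x ++ [' '])

def listStr4 (list : List Int) (tab : Int) : String :=
  String.ofList (list.foldl (listStr4Step tab) (0, PySem.List.pyRepeat ['\t'] tab ++ [' '])).2

-- ===== PORT B =====
-- Source B's chunk loop: take 4 elements at a time; a full chunk is joined with ' ' and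
-- followed by ",\n" + prefix, a short final chunk is joined and followed by ' '.
def listStr4Chunks (pre : List Char) : List Int → List Char
  | a :: b :: c :: d :: rest =>
      PySem.Chars.join [' ']
        [PySem.Int.toChars a, PySem.Int.toChars b, PySem.Int.toChars c, PySem.Int.toChars d]
        ++ [',', '\n'] ++ pre ++ listStr4Chunks pre rest
  | [] => []
  | short => PySem.Chars.join [' '] (short.map PySem.Int.toChars) ++ [' ']

def listStr4_alt (list : List Int) (tab : Int) : String :=
  let pre := PySem.List.pyRepeat ['\t'] tab ++ [' ']
  String.ofList (pre ++ listStr4Chunks pre list)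

-- ===== PRECONDITION & SPEC =====
def Spec_listStr4 (list : List Int) (tab : Int) (out : String) : Prop := out = listStr4_alt list tab
instance (list : List Int) (tab : Int) (out : String) : Decidable (Spec_listStr4 list tab out) := by unfold Spec_listStr4; infer_instance

-- ===== CLAIM (what is proved, stated in full; the proofs are below) =====
def Claim_equal_listStr4 : Prop := ∀ (list : List Int) (tab : Int), Dom_listStr4 list tab → Spec_listStr4 list tab (listStr4 list tab)

-- ===== LEMMAS AND PROOFS =====

theorem listStr4_loop (tab : Int) :
    ∀ (l : List Int) (k : Int) (s : List Char), (4:Int) ∣ k →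
      (l.foldl (listStr4Step tab) (k, s)).2
        = s ++ listStr4Chunks (PySem.List.pyRepeat ['\t'] tab ++ [' ']) l
  | [], _, _, _ => by simp [listStr4Chunks]
  | [a], k, s, h => by
      have h1 : ¬ (4:Int) ∣ (k + 1) := by omega
      simp [listStr4Step, listStr4Chunks, h1,
        PySem.Chars.join_singleton]
  | [a, b], k, s, h => by
      have h1 : ¬ (4:Int) ∣ (k + 1) := by omega
      have h2 : ¬ (4:Int) ∣ (k + 1 + 1) := by omega
      simp [listStr4Step, listStr4Chunks, h1, h2,
        PySem.Chars.join_cons_cons, PySem.Chars.join_singleton]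
  | [a, b, c], k, s, h => by
      have h1 : ¬ (4:Int) ∣ (k + 1) := by omega
      have h2 : ¬ (4:Int) ∣ (k + 1 + 1) := by omega
      have h3 : ¬ (4:Int) ∣ (k + 1 + 1 + 1) := by omega
      simp [listStr4Step, listStr4Chunks, h1, h2, h3,
        PySem.Chars.join_cons_cons, PySem.Chars.join_singleton]
  | a :: b :: c :: d :: rest, k, s, h => by
      have h1 : ¬ (4:Int) ∣ (k + 1) := by omega
      have h2 : ¬ (4:Int) ∣ (k + 1 + 1) := by omega
      have h3 : ¬ (4:Int) ∣ (k + 1 + 1 + 1) := by omega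
      have h4 : (4:Int) ∣ (k + 1 + 1 + 1 + 1) := by omega
      simp only [List.foldl_cons, listStr4Step, PySem.Int.mod_eq_zero_iff_dvd, beq_iff_eq,
        h1, h2, h3, h4, if_false, if_true]
      rw [listStr4_loop tab rest (k + 1 + 1 + 1 + 1) _ h4]
      simp [listStr4Chunks, PySem.Chars.join_cons_cons, PySem.Chars.join_singleton]

-- ===== VERDICT (by name: the statement is the Claim_ definition above) =====
theorem listStr4_spec : Claim_equal_listStr4 := by
  intro list tab _
  unfold Spec_listStr4 listStr4 listStr4_alt
  rw [listStr4_loop tab list 0 _ (by decide)]
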